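-- pv_equiv track=rewrite | github.com/mirror/vbox | doc/manual/correct_references.py | extractHrefList
-- ===== SOURCE A (Python) =====
-- def extractHrefTarget(line, start = 0):
--     target = ""
--     pointer0 = line.find("href=\"", start)
--     if pointer0 == -1:
--         return (target, -1)
--     pointer0 += len("href=\"")
--     pointer1 = line.find("\"", pointer0)
--     if pointer1 == -1:
--         return (target, -1)
--     return (line[pointer0:pointer1], pointer0)
--
-- def extractHrefList(line):
--     targets = []
--     index = 0
--     while index < len(line):
--         ttarget = extractHrefTarget(line, index)
--         index = ttarget[1]
--         if index == -1:
--             break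
--         targets.append(ttarget[0])
--     return targets
-- ===== SOURCE B (Python) =====
-- def extractHrefList(line):
--     # Phase 1: index all content-start positions (one per 'href="' occurrence).
--     starts = []
--     j = line.find('href="')
--     while j != -1:
--         starts.append(j + 6)
--         j = line.find('href="', j + 6)
--     # Phase 2: single pass over the index; stop at the first unterminated target.
--     targets = []
--     for p in starts:
--         q = line.find('"', p)
--         if q == -1:
--             break
--         targets.append(line[p:q])
--     return targets
-- ===== Notes on version B (the rewrite author's own statement) =====
-- stated objective: simpler
-- what changed: A's helper function and single moving-index while-loop (re-find the marker and re-check index<len each turn) are replaced by two separate phases: first collect every content-start position of the marker into a list, then a single pass extracts the quoted target per position, breaking at the first missing closing quote.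
import Mathlib
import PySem

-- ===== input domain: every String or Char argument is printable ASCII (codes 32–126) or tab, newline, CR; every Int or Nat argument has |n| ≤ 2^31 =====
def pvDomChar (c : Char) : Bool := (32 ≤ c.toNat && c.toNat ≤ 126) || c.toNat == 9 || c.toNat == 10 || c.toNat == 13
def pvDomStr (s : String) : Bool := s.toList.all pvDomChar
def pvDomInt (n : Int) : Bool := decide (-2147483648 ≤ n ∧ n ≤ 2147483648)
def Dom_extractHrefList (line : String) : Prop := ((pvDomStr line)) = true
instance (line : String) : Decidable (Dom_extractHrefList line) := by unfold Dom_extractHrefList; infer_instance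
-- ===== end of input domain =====

-- B replaces A's helper-plus-moving-index while-loop by two separate phases: index all
-- 'href="' occurrences first, then extract targets in a single pass (objective: simpler).

-- ===== PORT A =====
-- helper: extractHrefTarget(line, start), on the code-point list
def hrefTargetA (s : List Char) (start : Int) : List Char × Int :=
  let pointer0 := PySem.Chars.findFrom s ("href=\"".toList) start none
  if pointer0 = -1 then ([], -1)
  else
    let pointer0' := pointer0 + 6          -- pointer0 += len("href=\"")
    let pointer1 := PySem.Chars.findFrom s ("\"".toList) pointer0' none
    if pointer1 = -1 then ([], -1)
    else (PySem.Chars.slice s (some pointer0') (some pointer1), pointer0')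

-- the while-loop; each iteration moves index forward by at least 6, so length+1 fuel suffices
def loopA (s : List Char) : Nat → Int → List (List Char) → List (List Char)
  | 0, _, acc => acc
  | fuel + 1, index, acc =>
    if index < (s.length : Int) then
      let ttarget := hrefTargetA s index
      if ttarget.2 = -1 then acc
      else loopA s fuel ttarget.2 (acc ++ [ttarget.1])
    else acc

def extractHrefList (line : String) : List String :=
  (loopA line.toList (line.toList.length + 1) 0 []).map String.ofList

-- ===== PORT B =====
-- phase 1: the while-loop collecting all content-start positions (one per 'href="' occurrence)
def hrefStartsB (s : List Char) : Nat → Int → List Int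
  | 0, _ => []
  | fuel + 1, j =>
    let j' := PySem.Chars.findFrom s ("href=\"".toList) j none
    if j' = -1 then [] else (j' + 6) :: hrefStartsB s fuel (j' + 6)

-- phase 2: single pass over the collected positions, stopping at the first unterminated target
def extractB (s : List Char) : List Int → List (List Char)
  | [] => []
  | p :: rest =>
    let q := PySem.Chars.findFrom s ("\"".toList) p none
    if q = -1 then []
    else PySem.Chars.slice s (some p) (some q) :: extractB s rest

def extractHrefList_alt (line : String) : List String :=
  (extractB line.toList (hrefStartsB line.toList (line.toList.length + 1) 0)).map String.ofList

-- ===== PRECONDITION & SPEC =====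
def Spec_extractHrefList (line : String) (out : List String) : Prop := out = extractHrefList_alt line
instance (line : String) (out : List String) : Decidable (Spec_extractHrefList line out) := by unfold Spec_extractHrefList; infer_instance

-- ===== CLAIM (what is proved, stated in full; the proofs are below) =====
def Claim_equal_extractHrefList : Prop := ∀ (line : String), Dom_extractHrefList line → Spec_extractHrefList line (extractHrefList line)

-- ===== LEMMAS AND PROOFS =====

-- searching from index len(s) finds nothing (the loop-exit corner where A checks index < len first)
lemma findFrom_at_len (s sub : List Char) (hsub : sub ≠ []) :
    PySem.Chars.findFrom s sub ((s.length : Nat) : Int) none = -1 := by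
  rw [PySem.Chars.findFrom_natCast s sub s.length le_rfl]
  have h : PySem.Chars.find ([] : List Char) sub = -1 := by
    rw [PySem.Chars.find_eq_neg_one_iff]
    intro h; exact hsub (List.eq_nil_of_infix_nil h)
  simp [h]

-- A's combined loop at index i produces exactly B's extraction pass over B's position index from i
lemma loopA_eq (s : List Char) :
    ∀ (fuel : Nat) (i : Nat) (acc : List (List Char)), i ≤ s.length →
      loopA s fuel (i : Int) acc = acc ++ extractB s (hrefStartsB s fuel (i : Int)) := by
  intro fuel
  induction fuel with
  | zero => intro i acc hi; simp [loopA, hrefStartsB, extractB]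
  | succ fuel ih =>
    intro i acc hi
    by_cases hlt : (i : Int) < (s.length : Int)
    · rw [loopA, hrefStartsB, if_pos hlt]
      by_cases h0 : PySem.Chars.findFrom s ("href=\"".toList) (i : Int) none = -1
      · simp only [hrefTargetA, h0, ite_true]
        simp [extractB]
      · obtain ⟨hle, hpre, -⟩ :=
          PySem.Chars.findFrom_natCast_spec s ("href=\"".toList) i hi h0
        set r := PySem.Chars.findFrom s ("href=\"".toList) (i : Int) none with hr
        have hr0 : (0 : Int) ≤ r := le_trans (by positivity) hle
        have hrlen : r.toNat + 6 ≤ s.length := by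
          have := hpre.length_le
          simp [List.length_drop] at this
          omega
        have hcast : r + 6 = ((r.toNat + 6 : Nat) : Int) := by omega
        simp only [hrefTargetA, ← hr, h0, ite_false]
        by_cases h1 : PySem.Chars.findFrom s ("\"".toList) (r + 6) none = -1
        · simp only [h1, ite_true]
          rw [extractB]
          simp
          exact h1
        · simp only [h1, ite_false]
          rw [extractB]
          simp only [h1, ite_false]
          have h2 : ¬ (r + 6 = -1) := by omega
          simp only [if_neg h2]
          rw [hcast, ih (r.toNat + 6) _ hrlen]
          simp
    · have : i = s.length := by omega
      subst this
      rw [loopA, hrefStartsB, if_neg hlt, findFrom_at_len s _ (by simp)]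
      simp [extractB]

-- ===== VERDICT (by name: the statement is the Claim_ definition above) =====
theorem extractHrefList_spec : Claim_equal_extractHrefList := by
  intro line _
  unfold Spec_extractHrefList extractHrefList extractHrefList_alt
  rw [show ((0 : Int) = ((0 : Nat) : Int)) from rfl,
      loopA_eq line.toList (line.toList.length + 1) 0 [] (Nat.zero_le _)]
  simp
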